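-- pv_equiv track=rewrite | github.com/galkinaksenia/2020-2-level-labs | lab_1/main.py | get_concordance
-- ===== SOURCE A (Python) =====
-- def get_concordance(tokens, word, left_context_size, right_context_size):
--     concordance = []
--     if type(tokens) != list or type(word) != str: # or word not in tokens
--         return []
--     elif type(left_context_size) != int or type(right_context_size) != int:
--         return []
--     elif type(left_context_size) == int and type(right_context_size) == int and left_context_size < 1 and right_context_size < 1:
--         return []
--     elif right_context_size < 1 and left_context_size >= 1:
--         for number, token in enumerate (tokens):
--             context = []
--             if token == word:
--                 left_size = left_context_size
--                 while left_size != 0: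
--                     if number - left_size >= 0:
--                         context.append (tokens[number-left_size])
--                     left_size -= 1
--                 context.append (token)
--             if context != []:
--                 concordance.append (context)
--     elif right_context_size >= 1 and left_context_size < 1:
--         for number, token in enumerate (tokens):
--             context = []
--             if token == word:
--                 context = [token]
--                 iterations = 1
--                 right_size = right_context_size
--                 while right_size != 0:
--                     if len(tokens) > number + iterations:
--                         context.append (tokens[number+iterations])
--                     right_size -= 1
--                     iterations += 1
--             if context != []:
--                 concordance.append (context)
--     elif right_context_size >= 1 and left_context_size >= 1:
--         for number, token in enumerate (tokens):
--             context = []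
--             if token == word:
--                 iterations = 1
--                 left_size = left_context_size
--                 right_size = right_context_size
--                 while left_size != 0:
--                     if number - left_size >= 0:
--                         context.append (tokens[number-left_size])
--                     left_size -= 1
--                 context.append (token)
--                 while right_size != 0:
--                     if len(tokens) > number + iterations:
--                         context.append (tokens[number+iterations])
--                     right_size -= 1
--                     iterations += 1
--             if context != []:
--                 concordance.append (context)
--     return concordance
-- ===== SOURCE B (Python) =====
-- def get_concordance(tokens, word, left_context_size, right_context_size):
--     if type(tokens) != list or type(word) != str:
--         return []
--     if type(left_context_size) != int or type(right_context_size) != int: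
--         return []
--     left = left_context_size if left_context_size >= 1 else 0
--     right = right_context_size if right_context_size >= 1 else 0
--     if left == 0 and right == 0:
--         return []
--     return [tokens[max(0, i - left):i] + [token] + tokens[i + 1:i + 1 + right]
--             for i, token in enumerate(tokens) if token == word]
-- ===== Notes on version B (the rewrite author's own statement) =====
-- stated objective: simpler
-- what changed: Replaced A's three duplicated per-branch while-loop context builders (counting left_size/right_size down with per-step bounds checks) by one pass over enumerate(tokens) that builds each context with two clamped slices.
import Mathlib
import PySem

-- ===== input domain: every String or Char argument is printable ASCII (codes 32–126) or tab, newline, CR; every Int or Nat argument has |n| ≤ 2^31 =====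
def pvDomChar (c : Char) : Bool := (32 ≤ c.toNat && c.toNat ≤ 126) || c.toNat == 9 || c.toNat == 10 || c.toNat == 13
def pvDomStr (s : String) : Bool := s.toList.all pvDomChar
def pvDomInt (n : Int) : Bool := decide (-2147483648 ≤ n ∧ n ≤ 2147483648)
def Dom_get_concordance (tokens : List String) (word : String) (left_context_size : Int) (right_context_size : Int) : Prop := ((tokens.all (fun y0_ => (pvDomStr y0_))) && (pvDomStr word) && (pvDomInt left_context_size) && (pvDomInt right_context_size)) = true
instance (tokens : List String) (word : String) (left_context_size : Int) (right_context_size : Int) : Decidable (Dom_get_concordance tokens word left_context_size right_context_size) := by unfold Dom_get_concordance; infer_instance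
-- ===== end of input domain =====

-- B replaces A's three duplicated while-loop branches by one slicing pass over enumerate(tokens); objective: simpler.
-- A's runtime type guards hold identically under the Lean types and are omitted from both ports.

-- ===== PORT A =====
-- 'while left_size != 0: if number - left_size >= 0: context.append(tokens[number-left_size]); left_size -= 1'
-- (fuel n is left_size, counting down to 0; the index is always in range when the guard holds, so pyGetD is exact)
def pvLeftLoop (tokens : List String) (number : Int) : Nat → List String → List String
  | 0, context => context
  | n + 1, context =>
      pvLeftLoop tokens number n
        (if 0 ≤ number - ((n : Int) + 1) then context ++ [PySem.List.pyGetD tokens (number - ((n : Int) + 1)) ""] else context)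

-- 'while right_size != 0: if len(tokens) > number + iterations: context.append(tokens[number+iterations]); right_size -= 1; iterations += 1'
def pvRightLoop (tokens : List String) (number : Int) : Nat → Int → List String → List String
  | 0, _, context => context
  | n + 1, iterations, context =>
      pvRightLoop tokens number n (iterations + 1)
        (if (tokens.length : Int) > number + iterations then context ++ [PySem.List.pyGetD tokens (number + iterations) ""] else context)

def get_concordance (tokens : List String) (word : String) (left_context_size : Int) (right_context_size : Int) : List (List String) :=
  if left_context_size < 1 ∧ right_context_size < 1 then []
  else if right_context_size < 1 ∧ 1 ≤ left_context_size then
    (PySem.List.enumerate tokens 0).foldl (fun concordance nt =>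
      let context : List String :=
        if nt.2 == word then pvLeftLoop tokens nt.1 left_context_size.toNat [] ++ [nt.2] else []
      if context ≠ [] then concordance ++ [context] else concordance) []
  else if 1 ≤ right_context_size ∧ left_context_size < 1 then
    (PySem.List.enumerate tokens 0).foldl (fun concordance nt =>
      let context : List String :=
        if nt.2 == word then pvRightLoop tokens nt.1 right_context_size.toNat 1 [nt.2] else []
      if context ≠ [] then concordance ++ [context] else concordance) []
  else if 1 ≤ right_context_size ∧ 1 ≤ left_context_size then
    (PySem.List.enumerate tokens 0).foldl (fun concordance nt =>
      let context : List String :=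
        if nt.2 == word then
          pvRightLoop tokens nt.1 right_context_size.toNat 1 (pvLeftLoop tokens nt.1 left_context_size.toNat [] ++ [nt.2])
        else []
      if context ≠ [] then concordance ++ [context] else concordance) []
  else []

-- ===== PORT B =====
def get_concordance_alt (tokens : List String) (word : String) (left_context_size : Int) (right_context_size : Int) : List (List String) :=
  let left : Int := if 1 ≤ left_context_size then left_context_size else 0
  let right : Int := if 1 ≤ right_context_size then right_context_size else 0
  if left = 0 ∧ right = 0 then []
  else
    ((PySem.List.enumerate tokens 0).filter (fun nt => nt.2 == word)).map (fun nt =>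
      PySem.List.slice tokens (some (max 0 (nt.1 - left))) (some nt.1) ++ [nt.2] ++
      PySem.List.slice tokens (some (nt.1 + 1)) (some (nt.1 + 1 + right)))

-- ===== PRECONDITION & SPEC =====
def Spec_get_concordance (tokens : List String) (word : String) (left_context_size : Int) (right_context_size : Int) (out : List (List String)) : Prop := out = get_concordance_alt tokens word left_context_size right_context_size
instance (tokens : List String) (word : String) (left_context_size : Int) (right_context_size : Int) (out : List (List String)) : Decidable (Spec_get_concordance tokens word left_context_size right_context_size out) := by unfold Spec_get_concordance; infer_instance

-- ===== CLAIM (what is proved, stated in full; the proofs are below) =====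
def Claim_equal_get_concordance : Prop := ∀ (tokens : List String) (word : String) (left_context_size : Int) (right_context_size : Int), Dom_get_concordance tokens word left_context_size right_context_size → Spec_get_concordance tokens word left_context_size right_context_size (get_concordance tokens word left_context_size right_context_size)

-- ===== LEMMAS AND PROOFS =====

-- drop/take window as a map over its index range (all indices in range)
lemma dropTake_eq_map_range' (xs : List String) (a m : Nat) :
    (xs.drop a).take m = (List.range' a (min m (xs.length - a))).map (fun j => xs.getD j "") := by
  apply List.ext_getElem
  · simp
  · intro j h1 h2
    simp only [List.getElem_take, List.getElem_drop, List.getElem_map, List.getElem_range']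
    have hlt : a + j < xs.length := by simp at h2; omega
    simp [List.getD_eq_getElem?_getD, List.getElem?_eq_getElem hlt]

lemma pvLeftLoop_eq (tokens : List String) (k : Nat) :
    ∀ (n : Nat) (ctx : List String),
      pvLeftLoop tokens (k : Int) n ctx =
        ctx ++ (List.range' (k - n) (min n k)).map (fun j => tokens.getD j "") := by
  intro n
  induction n with
  | zero => intro ctx; simp [pvLeftLoop]
  | succ n ih =>
    intro ctx
    rw [pvLeftLoop, ih]
    by_cases h : n + 1 ≤ k
    · have hge : 0 ≤ (k : Int) - ((n : Int) + 1) := by omega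
      have hidx : (k : Int) - ((n : Int) + 1) = ((k - (n + 1) : Nat) : Int) := by omega
      rw [if_pos hge, hidx, PySem.List.pyGetD_natCast]
      have h1 : min (n + 1) k = (min n k) + 1 := by omega
      have h2 : k - (n + 1) + 1 = k - n := by omega
      rw [h1, List.range'_succ, h2]
      simp
    · have hge : ¬ 0 ≤ (k : Int) - ((n : Int) + 1) := by omega
      rw [if_neg hge]
      have h1 : min (n + 1) k = min n k := by omega
      have h2 : k - (n + 1) = k - n := by omega
      rw [h1, h2]

lemma pvRightLoop_eq (tokens : List String) (k : Nat) :
    ∀ (n : Nat) (it : Nat) (ctx : List String),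
      pvRightLoop tokens (k : Int) n (it : Int) ctx =
        ctx ++ (List.range' (k + it) (min n (tokens.length - (k + it)))).map (fun j => tokens.getD j "") := by
  intro n
  induction n with
  | zero => intro it ctx; simp [pvRightLoop]
  | succ n ih =>
    intro it ctx
    have hit : (it : Int) + 1 = ((it + 1 : Nat) : Int) := by omega
    rw [pvRightLoop, hit, ih]
    by_cases h : k + it < tokens.length
    · have hgt : (tokens.length : Int) > (k : Int) + (it : Int) := by omega
      have hidx : (k : Int) + (it : Int) = ((k + it : Nat) : Int) := by push_cast; ring
      rw [if_pos hgt, hidx, PySem.List.pyGetD_natCast]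
      have h1 : min (n + 1) (tokens.length - (k + it)) = (min n (tokens.length - (k + (it + 1)))) + 1 := by omega
      rw [h1, List.range'_succ]
      have h2 : k + it + 1 = k + (it + 1) := by omega
      rw [h2]; simp
    · have hgt : ¬ (tokens.length : Int) > (k : Int) + (it : Int) := by omega
      rw [if_neg hgt]
      have h1 : min (n + 1) (tokens.length - (k + it)) = 0 := by omega
      have h2 : min n (tokens.length - (k + (it + 1))) = 0 := by omega
      rw [h1, h2]
      simp

-- B's left slice, at an in-range index k, computed as the same index range
lemma left_slice_eq (tokens : List String) (k : Nat) (L : Int) (hL : 0 ≤ L) (hk : k < tokens.length) :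
    PySem.List.slice tokens (some (max 0 ((k : Int) - L))) (some (k : Int)) =
      (List.range' (k - L.toNat) (min L.toNat k)).map (fun j => tokens.getD j "") := by
  rw [PySem.List.slice_toNat (ha := le_max_left _ _) (hb := by positivity)]
  have h1 : (max 0 ((k : Int) - L)).toNat = k - L.toNat := by omega
  have h2 : (k : Int).toNat = k := by omega
  rw [h1, h2, dropTake_eq_map_range']
  congr 2
  omega

-- B's right slice, at an in-range index k, computed as the same index range
lemma right_slice_eq (tokens : List String) (k : Nat) (R : Int) (hR : 0 ≤ R) :
    PySem.List.slice tokens (some ((k : Int) + 1)) (some ((k : Int) + 1 + R)) =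
      (List.range' (k + 1) (min R.toNat (tokens.length - (k + 1)))).map (fun j => tokens.getD j "") := by
  rw [PySem.List.slice_toNat (ha := by positivity) (hb := by omega)]
  have h1 : ((k : Int) + 1).toNat = k + 1 := by omega
  have h2 : ((k : Int) + 1 + R).toNat = k + 1 + R.toNat := by omega
  rw [h1, h2, dropTake_eq_map_range']
  congr 2
  omega

-- A's per-branch fold is filter-then-map of the per-occurrence context builder
lemma foldA_eq_filter_map (tokens : List String) (word : String) (g : Int × String → List String)
    (hg : ∀ nt, g nt ≠ []) :
    (PySem.List.enumerate tokens 0).foldl (fun concordance nt =>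
        let context : List String := if nt.2 == word then g nt else []
        if context ≠ [] then concordance ++ [context] else concordance) [] =
      ((PySem.List.enumerate tokens 0).filter (fun nt => nt.2 == word)).map g := by
  have hfun : (fun (concordance : List (List String)) (nt : Int × String) =>
      let context : List String := if nt.2 == word then g nt else []
      if context ≠ [] then concordance ++ [context] else concordance) =
      (fun concordance nt => if nt.2 == word then concordance ++ [g nt] else concordance) := by
    funext concordance nt
    by_cases h : nt.2 == word
    · simp [h, hg nt]
    · simp [h]
  rw [hfun, PySem.List.foldl_append_if]
  simp

-- every element of the filtered enumeration is (k, tokens[k]) with tokens[k] = word, k < len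
lemma mem_filtered_enumerate (tokens : List String) (word : String) (nt : Int × String)
    (h : nt ∈ (PySem.List.enumerate tokens 0).filter (fun nt => nt.2 == word)) :
    ∃ (k : Nat), k < tokens.length ∧ nt.1 = (k : Int) ∧ nt.2 = word := by
  rw [List.mem_filter] at h
  obtain ⟨hmem, heq⟩ := h
  rw [PySem.List.mem_enumerate_iff] at hmem
  obtain ⟨k, hk, rfl⟩ := hmem
  exact ⟨k, hk, by simp, by simpa using heq⟩

lemma pvRightLoop_one_eq (tokens : List String) (k : Nat) (n : Nat) (ctx : List String) :
    pvRightLoop tokens (k : Int) n 1 ctx =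
      ctx ++ (List.range' (k + 1) (min n (tokens.length - (k + 1)))).map (fun j => tokens.getD j "") := by
  simpa using pvRightLoop_eq tokens k n 1 ctx

lemma pvRightLoop_ne_nil (tokens : List String) (num : Int) :
    ∀ (n : Nat) (it : Int) (ctx : List String), ctx ≠ [] → pvRightLoop tokens num n it ctx ≠ [] := by
  intro n
  induction n with
  | zero => intro it ctx h; simpa [pvRightLoop] using h
  | succ n ih =>
    intro it ctx h
    rw [pvRightLoop]
    apply ih
    split <;> simp [h]

-- ===== VERDICT (by name: the statement is the Claim_ definition above) =====
theorem get_concordance_spec : Claim_equal_get_concordance := by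
  intro tokens word L R _
  unfold Spec_get_concordance get_concordance get_concordance_alt
  by_cases hL : 1 ≤ L <;> by_cases hR : 1 ≤ R
  · -- both contexts
    rw [if_neg (by omega), if_neg (by omega), if_neg (by omega), if_pos ⟨hR, hL⟩]
    rw [if_pos hL, if_pos hR]
    rw [if_neg (by omega : ¬ (L = 0 ∧ R = 0))]
    rw [foldA_eq_filter_map tokens word _
      (fun nt => pvRightLoop_ne_nil tokens nt.1 R.toNat 1 _ (by simp))]
    apply List.map_congr_left
    intro nt hmem
    obtain ⟨k, hk, h1, _⟩ := mem_filtered_enumerate tokens word nt hmem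
    rw [h1, pvRightLoop_one_eq,
      pvLeftLoop_eq, left_slice_eq tokens k L (by omega) hk, right_slice_eq tokens k R (by omega)]
    simp
  · -- left context only
    rw [if_neg (by omega), if_pos ⟨by omega, hL⟩]
    rw [if_pos hL, if_neg hR]
    rw [if_neg (by omega : ¬ (L = 0 ∧ (0 : Int) = 0))]
    rw [foldA_eq_filter_map tokens word _ (fun nt => by simp)]
    apply List.map_congr_left
    intro nt hmem
    obtain ⟨k, hk, h1, _⟩ := mem_filtered_enumerate tokens word nt hmem
    rw [h1, pvLeftLoop_eq, left_slice_eq tokens k L (by omega) hk,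
      right_slice_eq tokens k 0 (by omega)]
    simp
  · -- right context only
    rw [if_neg (by omega), if_neg (by omega), if_pos ⟨hR, by omega⟩]
    rw [if_neg hL, if_pos hR]
    rw [if_neg (by omega : ¬ ((0 : Int) = 0 ∧ R = 0))]
    rw [foldA_eq_filter_map tokens word _
      (fun nt => pvRightLoop_ne_nil tokens nt.1 R.toNat 1 _ (by simp))]
    apply List.map_congr_left
    intro nt hmem
    obtain ⟨k, hk, h1, _⟩ := mem_filtered_enumerate tokens word nt hmem
    rw [h1, pvRightLoop_one_eq,
      left_slice_eq tokens k 0 (by omega) hk, right_slice_eq tokens k R (by omega)]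
    simp
  · -- neither: both sizes < 1
    rw [if_pos ⟨by omega, by omega⟩]
    rw [if_neg hL, if_neg hR]
    rw [if_pos ⟨rfl, rfl⟩]
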